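-- pv_equiv track=rewrite | github.com/fedeflowers/DSA | Array/numberOfValidSubarrays.py | validSubarrays
-- ===== SOURCE A (Python) =====
-- from typing import List
--
-- def validSubarrays(nums: List[int]) -> int:
--     nums.append(-1) #flush at the end
--     stack = []
--     res = 0
--     for i, el in enumerate(nums):
--         while stack and el < nums[stack[-1]]:
--             res += i - stack.pop()
--         stack.append(i)
--
--     return res
-- ===== SOURCE B (Python) =====
-- # Same side effect as A (appends the -1 sentinel to nums in place); return value computed
-- # by a direct per-start scan instead of a monotonic stack: simpler, no stack bookkeeping.
-- def validSubarrays(nums):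
--     nums.append(-1)  # sentinel, kept for the caller-visible mutation A performs
--     n = len(nums)
--     res = 0
--     for i in range(n - 1):
--         j = i + 1
--         while j < n and nums[j] >= nums[i]:
--             j += 1
--         if j < n:
--             res += j - i
--     return res
-- ===== Notes on version B (the rewrite author's own statement) =====
-- stated objective: simpler
-- what changed: Replaced the monotonic-stack pop loop with a direct scan: for each start index, walk right while elements stay >= nums[i] and add the distance to the first strictly smaller element (the appended -1 sentinel and its mutation are kept).
import Mathlib
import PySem

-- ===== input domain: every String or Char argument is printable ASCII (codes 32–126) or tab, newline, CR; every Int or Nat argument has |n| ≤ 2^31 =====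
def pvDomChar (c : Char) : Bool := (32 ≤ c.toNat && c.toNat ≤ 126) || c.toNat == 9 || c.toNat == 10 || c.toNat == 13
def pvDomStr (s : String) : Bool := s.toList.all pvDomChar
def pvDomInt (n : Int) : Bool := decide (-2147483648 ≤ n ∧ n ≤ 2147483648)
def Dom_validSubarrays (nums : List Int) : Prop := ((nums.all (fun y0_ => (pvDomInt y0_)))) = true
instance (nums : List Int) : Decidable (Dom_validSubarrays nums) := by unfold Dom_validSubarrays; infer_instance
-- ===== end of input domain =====

-- B changes the algorithm (direct per-start scan instead of a monotonic stack) for simplicity;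
-- both Pythons append -1 to nums in place (identical side effect), the theorems are about the return value.

-- ===== PORT A =====
-- the inner `while stack and el < nums[stack[-1]]: res += i - stack.pop()`
def popLoop (xs : List Int) (el : Int) (i : Int) : List Int → Int → (List Int × Int)
  | [], res => ([], res)
  | t :: rest, res =>
    if el < PySem.List.pyGetD xs t 0 then popLoop xs el i rest (res + (i - t))
    else (t :: rest, res)

def validSubarrays (nums : List Int) : Int :=
  let xs := nums ++ [-1]      -- nums.append(-1)
  let st := (PySem.List.enumerate xs 0).foldl
    (fun (st : List Int × Int) (p : Int × Int) =>
      let r := popLoop xs p.2 p.1 st.1 st.2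
      (p.1 :: r.1, r.2)) ([], 0)
  st.2

-- ===== PORT B =====
-- the inner `j = i+1; while j < n and nums[j] >= nums[i]: j += 1`
def findJ (xs : List Int) (n : Nat) (v : Int) (j : Nat) : Nat :=
  if h : j < n then
    if v ≤ PySem.List.pyGetD xs (j : Int) 0 then findJ xs n v (j + 1) else j
  else j
termination_by n - j

def validSubarrays_alt (nums : List Int) : Int :=
  let xs := nums ++ [-1]      -- nums.append(-1)
  let n := xs.length
  (List.range (n - 1)).foldl
    (fun (res : Int) (i : Nat) =>
      let j := findJ xs n (PySem.List.pyGetD xs (i : Int) 0) (i + 1)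
      if j < n then res + ((j : Int) - (i : Int)) else res) 0

-- ===== PRECONDITION & SPEC =====
def Spec_validSubarrays (nums : List Int) (out : Int) : Prop := out = validSubarrays_alt nums
instance (nums : List Int) (out : Int) : Decidable (Spec_validSubarrays nums out) := by unfold Spec_validSubarrays; infer_instance

-- ===== CLAIM (what is proved, stated in full; the proofs are below) =====
def Claim_equal_validSubarrays : Prop := ∀ (nums : List Int), Dom_validSubarrays nums → Spec_validSubarrays nums (validSubarrays nums)

-- ===== LEMMAS AND PROOFS =====

lemma popLoop_nil (xs : List Int) (el i : Int) (res : Int) :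
    popLoop xs el i [] res = ([], res) := rfl

lemma popLoop_cons (xs : List Int) (el i : Int) (t : Int) (rest : List Int) (res : Int) :
    popLoop xs el i (t :: rest) res =
      if el < PySem.List.pyGetD xs t 0 then popLoop xs el i rest (res + (i - t))
      else (t :: rest, res) := rfl

-- abbreviation used only by the proofs: first index ≥ j+1 whose value is < xs[j] (or n)
def FS (xs : List Int) (j : Nat) : Nat := findJ xs xs.length (xs.getD j 0) (j + 1)

lemma findJ_ge (xs : List Int) (n : Nat) (v : Int) (j : Nat) : j ≤ findJ xs n v j := by
  fun_induction findJ xs n v j with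
  | case1 j h hle ih => omega
  | case2 j h hle => omega
  | case3 j h => omega

lemma findJ_stop (xs : List Int) (n : Nat) (v : Int) (j : Nat)
    (h : findJ xs n v j < n) : xs.getD (findJ xs n v j) 0 < v := by
  fun_induction findJ xs n v j with
  | case1 j hlt hle ih => exact ih h
  | case2 j hlt hle => simpa using hle
  | case3 j hlt => omega

lemma findJ_mid (xs : List Int) (n : Nat) (v : Int) (j m : Nat)
    (h1 : j ≤ m) (h2 : m < findJ xs n v j) : v ≤ xs.getD m 0 := by
  fun_induction findJ xs n v j with
  | case1 j hlt hle ih =>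
    rcases Nat.eq_or_lt_of_le h1 with rfl | h1'
    · simpa using hle
    · exact ih (by omega) h2
  | case2 j hlt hle => omega
  | case3 j hlt => omega

lemma findJ_min (xs : List Int) (n : Nat) (v : Int) (j m : Nat)
    (h1 : j ≤ m) (_h2 : m < n) (h3 : xs.getD m 0 < v) : findJ xs n v j ≤ m := by
  by_contra h
  exact absurd (findJ_mid xs n v j m h1 (by omega)) (by omega)

lemma FS_ge (xs : List Int) (j : Nat) : j + 1 ≤ FS xs j := findJ_ge _ _ _ _

lemma FS_eq_iff (xs : List Int) (j k : Nat) (hk : k < xs.length) (hjk : j < k)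
    (hkF : k ≤ FS xs j) : FS xs j = k ↔ xs.getD k 0 < xs.getD j 0 := by
  constructor
  · intro h
    have := findJ_stop xs xs.length (xs.getD j 0) (j + 1) (by rw [FS] at h; omega)
    rw [FS] at h; rw [h] at this; exact this
  · intro h
    have := findJ_min xs xs.length (xs.getD j 0) (j + 1) k hjk hk h
    simp only [FS] at hkF ⊢; omega

-- monotonicity along the stack: a deeper (smaller) un-popped index carries a value ≤ a shallower one
lemma FS_mono (xs : List Int) (j' j : Nat) (h1 : j' < j) (h2 : j < FS xs j') :
    xs.getD j' 0 ≤ xs.getD j 0 :=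
  findJ_mid xs xs.length (xs.getD j' 0) (j' + 1) j h1 h2

-- the stack and accumulated result after processing indices 0..k-1
def stkSpec (xs : List Int) (k : Nat) : List Nat :=
  ((List.range k).filter (fun j => decide (k ≤ FS xs j))).reverse

def resSpec (xs : List Int) (k : Nat) : Int :=
  ((List.range k).map (fun j => if FS xs j < k then ((FS xs j : Int) - (j : Int)) else 0)).sum

-- the A-side fold re-indexed over the processed prefix length
def runA (xs : List Int) (k : Nat) : List Int × Int :=
  (PySem.List.pyRange 0 (k : Int) 1).foldl
    (fun st j =>
      let r := popLoop xs (PySem.List.pyGetD xs j 0) j st.1 st.2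
      (j :: r.1, r.2)) ([], 0)

lemma popLoop_spec (xs : List Int) (k : Nat) (hk : k < xs.length) :
    ∀ (js : List Nat) (res : Int), js.Pairwise (· > ·) →
    (∀ j ∈ js, j < k ∧ k ≤ FS xs j) →
    popLoop xs (xs.getD k 0) (k : Int) (js.map (fun (j : Nat) => (j : Int))) res =
      ((js.filter (fun j => decide (k + 1 ≤ FS xs j))).map (fun (j : Nat) => (j : Int)),
       res + ((js.filter (fun j => decide (FS xs j = k))).map
                (fun (j : Nat) => ((k : Int) - (j : Int)))).sum) := by
  intro js
  induction js with
  | nil => intro res _ _; simp [popLoop_nil]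
  | cons j rest ih =>
    intro res hpw hmem
    obtain ⟨hjk, hkF⟩ := hmem j (by simp)
    have hpw' := (List.pairwise_cons.mp hpw).2
    have hhd := (List.pairwise_cons.mp hpw).1
    by_cases h : xs.getD k 0 < xs.getD j 0
    · -- head is popped
      have hFk : FS xs j = k := (FS_eq_iff xs j k hk hjk hkF).mpr h
      rw [List.map_cons, popLoop_cons, PySem.List.pyGetD_natCast, if_pos h]
      rw [ih (res + ((k : Int) - (j : Int))) hpw' (fun j' hj' => hmem j' (by simp [hj']))]
      simp [hFk, add_assoc]
    · -- head stays: nothing above it can be popped either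
      have hall : ∀ j' ∈ j :: rest, ¬ (FS xs j' = k) := by
        intro j' hj'
        rcases List.mem_cons.mp hj' with rfl | hj'
        · intro hc; exact h ((FS_eq_iff xs j' k hk hjk hkF).mp hc)
        · obtain ⟨hj'k, hkF'⟩ := hmem j' (by simp [hj'])
          have hlt : j' < j := hhd j' hj'
          have hmono : xs.getD j' 0 ≤ xs.getD j 0 := FS_mono xs j' j hlt (by omega)
          intro hc
          exact h (by have := (FS_eq_iff xs j' k hk hj'k hkF').mp hc; omega)
      have h1 : (j :: rest).filter (fun j' => decide (k + 1 ≤ FS xs j')) = j :: rest := by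
        apply List.filter_eq_self.mpr
        intro j' hj'
        have := hall j' hj'
        have := (hmem j' hj').2
        simp; omega
      have h2 : (j :: rest).filter (fun j' => decide (FS xs j' = k)) = [] := by
        apply List.filter_eq_nil_iff.mpr
        intro j' hj'
        simpa using hall j' hj'
      rw [List.map_cons, popLoop_cons, PySem.List.pyGetD_natCast, if_neg h, h1, h2]
      simp

-- summing over a filtered list = summing the guarded terms (specific bridge used by res_step)
lemma sum_map_filter_decide (l : List Nat) (f : Nat → Int) (p : Nat → Prop) [DecidablePred p] :
    ((l.filter (fun j => decide (p j))).map f).sum = (l.map (fun j => if p j then f j else 0)).sum := by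
  induction l with
  | nil => simp
  | cons a l ih =>
    by_cases h : p a <;> simp [h, ih]

lemma stk_pairwise (xs : List Int) (k : Nat) : (stkSpec xs k).Pairwise (· > ·) := by
  unfold stkSpec
  rw [List.pairwise_reverse]
  exact List.Pairwise.filter _ List.pairwise_lt_range

lemma stk_mem (xs : List Int) (k : Nat) : ∀ j ∈ stkSpec xs k, j < k ∧ k ≤ FS xs j := by
  intro j hj
  unfold stkSpec at hj
  rw [List.mem_reverse, List.mem_filter, List.mem_range] at hj
  simpa using hj

lemma stk_step (xs : List Int) (k : Nat) :
    stkSpec xs (k + 1) = k :: (stkSpec xs k).filter (fun j => decide (k + 1 ≤ FS xs j)) := by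
  unfold stkSpec
  rw [List.range_succ, List.filter_append, List.reverse_append, List.filter_reverse,
      List.filter_filter]
  have hkeep : List.filter (fun j => decide (k + 1 ≤ FS xs j)) [k] = [k] := by
    have := FS_ge xs k
    simp; omega
  have hcongr : List.filter (fun a => decide (k + 1 ≤ FS xs a) && decide (k ≤ FS xs a)) (List.range k)
      = List.filter (fun a => decide (k + 1 ≤ FS xs a)) (List.range k) := by
    apply List.filter_congr
    intro j _
    by_cases h : k + 1 ≤ FS xs j
    · simp [h]; omega
    · simp [h]
  rw [hkeep, hcongr]
  rfl

lemma res_step (xs : List Int) (k : Nat) :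
    resSpec xs (k + 1) = resSpec xs k +
      (((stkSpec xs k).filter (fun j => decide (FS xs j = k))).map
        (fun (j : Nat) => ((k : Int) - (j : Int)))).sum := by
  have hstk : (stkSpec xs k).filter (fun j => decide (FS xs j = k))
      = ((List.range k).filter (fun j => decide (FS xs j = k))).reverse := by
    unfold stkSpec
    rw [List.filter_reverse, List.filter_filter]
    congr 1
    apply List.filter_congr
    intro j _
    by_cases h : FS xs j = k
    · simp [h]
    · simp [h]
  rw [hstk, List.map_reverse, List.sum_reverse, sum_map_filter_decide]
  unfold resSpec
  rw [List.range_succ, List.map_append, List.sum_append]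
  have hlast : (List.map (fun j => if FS xs j < k + 1 then ((FS xs j : Int) - (j : Int)) else 0) [k]).sum = 0 := by
    have := FS_ge xs k
    simp; omega
  rw [hlast, add_zero]
  rw [← PySem.List.sum_map_add_int (List.range k)
        (fun j => if FS xs j < k then ((FS xs j : Int) - (j : Int)) else 0)
        (fun j => if FS xs j = k then ((k : Int) - (j : Int)) else 0)]
  apply congrArg
  apply List.map_congr_left
  intro j _
  split_ifs <;> omega

lemma runA_spec (xs : List Int) (k : Nat) (hk : k ≤ xs.length) :
    runA xs k = ((stkSpec xs k).map (fun (j : Nat) => (j : Int)), resSpec xs k) := by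
  induction k with
  | zero =>
    simp [runA, stkSpec, resSpec, PySem.List.pyRange_one_eq_nil]
  | succ k ih =>
    have hklt : k < xs.length := by omega
    have hcast : (((k + 1 : Nat)) : Int) = (k : Int) + 1 := by push_cast; ring
    unfold runA
    rw [hcast, PySem.List.pyRange_one_succ_right (by positivity), List.foldl_append]
    rw [show (PySem.List.pyRange 0 (k : Int) 1).foldl
          (fun st j =>
            let r := popLoop xs (PySem.List.pyGetD xs j 0) j st.1 st.2
            (j :: r.1, r.2)) ([], 0) = runA xs k from rfl]
    rw [ih (by omega)]
    simp only [List.foldl_cons, List.foldl_nil, PySem.List.pyGetD_natCast]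
    rw [show xs.getD k 0 = xs.getD k 0 from rfl]
    rw [popLoop_spec xs k hklt (stkSpec xs k) (resSpec xs k) (stk_pairwise xs k) (stk_mem xs k)]
    rw [stk_step, res_step]
    simp

theorem a_eq_b (nums : List Int) : validSubarrays nums = validSubarrays_alt nums := by
  have hA : validSubarrays nums = (runA (nums ++ [-1]) (nums ++ [-1]).length).2 := by
    unfold validSubarrays runA
    dsimp only
    rw [PySem.List.enumerate_eq_map_pyRange (d := 0), PySem.List.len_eq, List.foldl_map]
  have hB : validSubarrays_alt nums =
      0 + ((List.range ((nums ++ [-1]).length - 1)).map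
        (fun i => if FS (nums ++ [-1]) i < (nums ++ [-1]).length
                  then ((FS (nums ++ [-1]) i : Int) - (i : Int)) else 0)).sum := by
    unfold validSubarrays_alt
    dsimp only
    have hfun : (fun (res : Int) (i : Nat) =>
        let j := findJ (nums ++ [-1]) (nums ++ [-1]).length
                   (PySem.List.pyGetD (nums ++ [-1]) (i : Int) 0) (i + 1)
        if j < (nums ++ [-1]).length then res + ((j : Int) - (i : Int)) else res)
      = (fun (res : Int) (i : Nat) => res +
          (if FS (nums ++ [-1]) i < (nums ++ [-1]).length
           then ((FS (nums ++ [-1]) i : Int) - (i : Int)) else 0)) := by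
      funext res i
      simp only [PySem.List.pyGetD_natCast, FS]
      split <;> simp
    rw [hfun, PySem.List.foldl_add]
  rw [hA, hB]
  have hr := runA_spec (nums ++ [-1]) (nums ++ [-1]).length (le_refl _)
  rw [hr]
  simp only [zero_add]
  show resSpec (nums ++ [-1]) (nums ++ [-1]).length = _
  have hlen : (nums ++ [-1]).length = nums.length + 1 := by simp
  unfold resSpec
  rw [hlen]
  rw [show nums.length + 1 - 1 = nums.length from rfl, List.range_succ,
      List.map_append, List.sum_append]
  have hlast : (List.map (fun j => if FS (nums ++ [-1]) j < nums.length + 1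
      then ((FS (nums ++ [-1]) j : Int) - (j : Int)) else 0) [nums.length]).sum = 0 := by
    have := FS_ge (nums ++ [-1]) nums.length
    simp; omega
  rw [hlast, add_zero]

-- ===== VERDICT (by name: the statement is the Claim_ definition above) =====
theorem validSubarrays_spec : Claim_equal_validSubarrays := by
  intro nums _
  exact a_eq_b nums
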